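-- pv_equiv track=rewrite | github.com/lishehao-ctrl/CalendarDIFF | app/modules/sync/archive/legacy_normalizer.py | _normalize_number_token
-- ===== SOURCE A (Python) =====
-- def _normalize_number_token(token: str) -> str | None:
--     if not token:
--         return None
--
--     digit_end = 0
--     while digit_end < len(token) and token[digit_end].isdigit():
--         digit_end += 1
--
--     if digit_end < 1 or digit_end > 4:
--         return None
--
--     suffix = token[digit_end:]
--     if len(suffix) > 1:
--         return None
--     if suffix and not suffix.isalpha():
--         return None
--     if digit_end + len(suffix) != len(token):
--         return None
--
--     return token[:digit_end] + suffix
-- ===== SOURCE B (Python) =====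
-- def _normalize_number_token(token: str) -> str | None:
--     # A valid token is returned unchanged, so just validate: peel an optional
--     # trailing letter, then the rest must be 1-4 digits.
--     if token and token[-1].isalpha():
--         digits = token[:-1]
--     else:
--         digits = token
--     if 1 <= len(digits) <= 4 and digits.isdigit():
--         return token
--     return None
-- ===== Notes on version B (the rewrite author's own statement) =====
-- stated objective: simpler
-- what changed: Instead of scanning leading digits with a while loop and validating the remainder in four separate guard returns, B peels at most one trailing letter from the end and checks once that what remains is 1-4 digits, returning the token unchanged on success.
import Mathlib
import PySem

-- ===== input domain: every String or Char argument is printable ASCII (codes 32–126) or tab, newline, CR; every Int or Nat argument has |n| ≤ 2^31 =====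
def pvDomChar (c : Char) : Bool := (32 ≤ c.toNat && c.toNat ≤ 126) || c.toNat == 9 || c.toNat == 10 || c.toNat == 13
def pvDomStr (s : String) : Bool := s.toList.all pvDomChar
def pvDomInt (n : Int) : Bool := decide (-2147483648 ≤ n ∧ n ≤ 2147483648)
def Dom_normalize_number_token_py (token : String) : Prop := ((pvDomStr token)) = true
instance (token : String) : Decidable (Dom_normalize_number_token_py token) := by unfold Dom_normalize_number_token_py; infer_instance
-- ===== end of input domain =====

-- ===== PORT A =====
-- B validates by peeling one optional trailing letter instead of A's leading-digit scan; objective: simpler.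
-- while digit_end < len(token) and token[digit_end].isdigit(): digit_end += 1   (scan of leading digits)
def pvDigitEnd : List Char  →  Nat
  | [] => 0
  | c :: cs => if PySem.Chars.isdigit c then pvDigitEnd cs + 1 else 0

def normalize_number_token_py (token : String) : Option String :=
  let cs := token.toList
  if cs.isEmpty then none
  else
    let digit_end := pvDigitEnd cs
    if digit_end < 1 || digit_end > 4 then none
    else
      let suffix := PySem.List.slice cs (some (digit_end : Int)) none
      if suffix.length > 1 then none
      else if !suffix.isEmpty && !(PySem.Chars.strIsalpha suffix) then none
      else if digit_end + suffix.length != cs.length then none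
      else some (String.ofList (PySem.List.slice cs none (some (digit_end : Int)) ++ suffix))

-- ===== PORT B =====
def normalize_number_token_py_alt (token : String) : Option String :=
  let cs := token.toList
  let digits :=
    match PySem.List.pyGet? cs (-1) with      -- token[-1] if token else the empty-token branch
    | some c => if PySem.Chars.isalpha c then PySem.List.slice cs none (some (-1)) else cs
    | none => cs
  if 1  ≤  digits.length && digits.length  ≤  4 && PySem.Chars.strIsdigit digits then some token
  else none

-- ===== PRECONDITION & SPEC =====
def Spec_normalize_number_token_py (token : String) (out : Option String) : Prop := out = normalize_number_token_py_alt token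
instance (token : String) (out : Option String) : Decidable (Spec_normalize_number_token_py token out) := by unfold Spec_normalize_number_token_py; infer_instance

-- ===== CLAIM (what is proved, stated in full; the proofs are below) =====
def Claim_equal_normalize_number_token_py : Prop := ∀ (token : String), Dom_normalize_number_token_py token  →  Spec_normalize_number_token_py token (normalize_number_token_py token)

-- ===== LEMMAS AND PROOFS =====
def pvCondA (cs : List Char) : Bool :=
  !cs.isEmpty && decide (1  ≤  pvDigitEnd cs) && decide (pvDigitEnd cs  ≤  4)
    && decide ((cs.drop (pvDigitEnd cs)).length  ≤  1)
    && (cs.drop (pvDigitEnd cs)).all PySem.Chars.isalpha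

def pvCondB (cs : List Char) : Bool :=
  let digits :=
    match PySem.List.pyGet? cs (-1) with
    | some c => if PySem.Chars.isalpha c then PySem.List.slice cs none (some (-1)) else cs
    | none => cs
  decide (1  ≤  digits.length) && decide (digits.length  ≤  4) && PySem.Chars.strIsdigit digits

theorem pvDigitEnd_le (cs : List Char) : pvDigitEnd cs  ≤  cs.length := by
  induction cs with
  | nil => simp [pvDigitEnd]
  | cons c cs ih => simp only [pvDigitEnd, List.length_cons]; split <;> omega

theorem pvDigitEnd_eq (cs : List Char) :
    pvDigitEnd cs = (cs.takeWhile PySem.Chars.isdigit).length := by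
  induction cs with
  | nil => simp [pvDigitEnd]
  | cons c cs ih =>
    simp only [pvDigitEnd, List.takeWhile_cons]
    split <;> rename_i h <;> simp [ih]

theorem pvDigit_not_alpha (c : Char) (h : PySem.Chars.isdigit c = true) :
    PySem.Chars.isalpha c = false := by
  simp only [PySem.Chars.isdigit, Bool.and_eq_true, decide_eq_true_eq] at h
  simp only [PySem.Chars.isalpha, PySem.Chars.isupper, PySem.Chars.islower]
  obtain ⟨h1, h2⟩ := h
  simp only [Bool.or_eq_false_iff, Bool.and_eq_false_iff]
  constructor
  · left; simp only [decide_eq_false_iff_not]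
    intro hA; exact absurd (le_trans hA h2) (by decide)
  · left; simp only [decide_eq_false_iff_not]
    intro ha; exact absurd (le_trans ha h2) (by decide)

theorem pvA_eq (token : String) :
    normalize_number_token_py token =
      if pvCondA token.toList then some token else none := by
  unfold normalize_number_token_py pvCondA
  have hle := pvDigitEnd_le token.toList
  simp only [PySem.List.slice_from_natCast, PySem.List.slice_to_natCast,
    List.take_append_drop, String.ofList_toList, List.length_drop]
  split_ifs with h1 h2 h3 h4 h5 <;>
    simp_all [List.isEmpty_iff, List.all_eq_true, PySem.Chars.strIsalpha,
      Bool.and_eq_true]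
  · omega
  · omega
  · rename_i hA hB
    obtain ⟨hlt, hor⟩ := hA
    rcases hor with h | ⟨x, hx, hxa⟩
    · omega
    · exact absurd (hB.2 x hx) (by simp [hxa])
  · rename_i hA hB
    have hlen : token.toList.length = token.length := by simp
    obtain ⟨x, hx, hxa⟩ := hB (by omega)
    by_cases hdl : pvDigitEnd token.toList < token.length
    · exact absurd (hA (by omega) x hx) (by simp [hxa])
    · have hnil : List.drop (pvDigitEnd token.toList) token.toList = [] :=
        List.drop_eq_nil_of_le (by omega)
      simp [hnil] at hx

theorem pvB_eq (token : String) :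
    normalize_number_token_py_alt token =
      if pvCondB token.toList then some token else none := by
  unfold normalize_number_token_py_alt pvCondB
  rfl

theorem pvDrop_takeWhile (p : Char → Bool) (l : List Char) :
    l.drop (l.takeWhile p).length = l.dropWhile p := by
  induction l with
  | nil => simp
  | cons c cs ih => by_cases h : p c <;> simp [h, ih]

theorem pvCond_eq (cs : List Char) : pvCondA cs = pvCondB cs := by
  have hall : ∀ c ∈ cs.takeWhile PySem.Chars.isdigit, PySem.Chars.isdigit c = true :=
    fun c hc => List.mem_takeWhile_imp hc
  have hcnd : ∀ c r', cs.dropWhile PySem.Chars.isdigit = c :: r' →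
      PySem.Chars.isdigit c = false := by
    intro c r' h
    have := List.head_dropWhile_not PySem.Chars.isdigit (l := cs) (by rw [h]; simp)
    simpa [h] using this
  have hcs : cs.takeWhile PySem.Chars.isdigit ++ cs.dropWhile PySem.Chars.isdigit = cs :=
    List.takeWhile_append_dropWhile
  unfold pvCondA pvCondB
  simp only [pvDigitEnd_eq, pvDrop_takeWhile, PySem.List.pyGet?_neg_one,
    PySem.List.slice_to_neg_one]
  generalize hds : cs.takeWhile PySem.Chars.isdigit = ds at hall hcs ⊢
  generalize hdw : cs.dropWhile PySem.Chars.isdigit = rest at hcnd hcs ⊢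
  clear hds hdw
  subst hcs
  rcases rest with _ | ⟨c, rest'⟩
  · simp only [List.append_nil]
    rcases ds with _ | ⟨e, ds'⟩
    · rfl
    · have hgl : (e :: ds').getLast? = some ((e :: ds').getLast (by simp)) := by
        simp [List.getLast?_eq_some_getLast]
      have hlast : PySem.Chars.isalpha ((e :: ds').getLast (by simp)) = false :=
        pvDigit_not_alpha _ (hall _ (List.getLast_mem _))
      simp [hgl, hlast, PySem.Chars.strIsdigit, List.all_eq_true, hall]
      intro _ x hx
      exact hall x (List.mem_cons_of_mem _ hx)
  · have hc : PySem.Chars.isdigit c = false := hcnd c rest' rfl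
    rcases rest' with _ | ⟨d, rest''⟩
    · rw [List.getLast?_concat, List.dropLast_concat]
      by_cases ha : PySem.Chars.isalpha c = true
      · simp only [ha, if_true]
        have hallb : ds.all PySem.Chars.isdigit = true := by
          simp only [List.all_eq_true]; exact hall
        simp [PySem.Chars.strIsdigit, hallb]
        rcases ds with _ | ⟨e, ds'⟩ <;> simp
        intro _
        exact ha
      · simp only [Bool.not_eq_true] at ha
        simp only [ha, Bool.false_eq_true, if_false]
        simp [PySem.Chars.strIsdigit, ha]
        intros
        exact hc
    · have hmem : ∀ dgs : List Char, c ∈ dgs → PySem.Chars.strIsdigit dgs = false := by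
        intro dgs hm
        simp [PySem.Chars.strIsdigit]
        intro _
        exact ⟨c, hm, by simp [hc]⟩
      cases hgl : (ds ++ c :: d :: rest'').getLast? with
      | none => simp at hgl
      | some e =>
        simp
        intro _ _
        split <;> exact hmem _ (by simp)

theorem normalize_number_token_py_spec : Claim_equal_normalize_number_token_py := by
  intro token _
  unfold Spec_normalize_number_token_py
  rw [pvA_eq, pvB_eq, pvCond_eq]
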